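-- pv_equiv track=rewrite | github.com/SMRGHackathon2017/SMRGHackathon2017.github.io | coc-summarise.py | get_time_bin
-- ===== SOURCE A (Python) =====
-- def get_time_bin(relative_time):
--
--     start = 0
--     stop = 3600
--     increment = 3600
--
--     for i in range(24):
--         if relative_time >= start and relative_time < stop:
--             return i + 1
--         else:
--             start = stop
--             stop += increment
--
--     return 25
-- ===== SOURCE B (Python) =====
-- def get_time_bin(relative_time):
--     # Closed form: hour index by integer division, sentinel 25 outside [0, 86400).
--     if relative_time < 0 or relative_time >= 86400:
--         return 25
--     return int(relative_time // 3600) + 1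
-- ===== Notes on version B (the rewrite author's own statement) =====
-- stated objective: simpler
-- what changed: Replaced the 24-iteration linear scan over hour windows with a closed-form integer division plus a range guard.
import Mathlib
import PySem

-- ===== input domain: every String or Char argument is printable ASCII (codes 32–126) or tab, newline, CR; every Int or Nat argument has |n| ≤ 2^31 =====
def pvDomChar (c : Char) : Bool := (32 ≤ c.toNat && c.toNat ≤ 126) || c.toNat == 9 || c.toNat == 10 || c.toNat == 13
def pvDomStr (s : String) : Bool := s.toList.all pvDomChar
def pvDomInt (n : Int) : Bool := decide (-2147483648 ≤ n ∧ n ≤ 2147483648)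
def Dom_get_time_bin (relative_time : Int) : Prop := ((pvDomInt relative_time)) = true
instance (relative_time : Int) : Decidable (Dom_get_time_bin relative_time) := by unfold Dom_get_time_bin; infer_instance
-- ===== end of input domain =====

-- B replaces A's 24-step linear scan over hour windows with a closed-form integer division (simpler).

-- ===== PORT A =====
-- A's for-loop over range(24) with mutable start/stop, transcribed as structural recursion on i.
def get_time_bin_loopA (relative_time : Int) (i : Nat) (start stop : Int) : Int :=
  if h : i < 24 then
    if relative_time ≥ start ∧ relative_time < stop then (i : Int) + 1
    else get_time_bin_loopA relative_time (i + 1) stop (stop + 3600)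
  else 25
termination_by 24 - i

def get_time_bin (relative_time : Int) : Int :=
  get_time_bin_loopA relative_time 0 0 3600

-- ===== PORT B =====
def get_time_bin_alt (relative_time : Int) : Int :=
  if relative_time < 0 ∨ relative_time ≥ 86400 then 25
  else PySem.Int.floordiv relative_time 3600 + 1

-- ===== PRECONDITION & SPEC =====
def Spec_get_time_bin (relative_time : Int) (out : Int) : Prop := out = get_time_bin_alt relative_time
instance (relative_time : Int) (out : Int) : Decidable (Spec_get_time_bin relative_time out) := by unfold Spec_get_time_bin; infer_instance

-- ===== CLAIM (what is proved, stated in full; the proofs are below) =====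
def Claim_equal_get_time_bin : Prop := ∀ (relative_time : Int), Dom_get_time_bin relative_time → Spec_get_time_bin relative_time (get_time_bin relative_time)

-- ===== LEMMAS AND PROOFS =====

-- Loop invariant: starting at iteration i with start = 3600*i, stop = 3600*(i+1),
-- the remaining loop returns the closed-form value for inputs not caught by earlier iterations.
theorem get_time_bin_loopA_eq (t : Int) :
    ∀ (k i : Nat), i + k = 24 → (3600 * (i : Int) ≤ t ∨ t < 0) →
      get_time_bin_loopA t i (3600 * (i : Int)) (3600 * ((i : Int) + 1)) =
        if t < 0 ∨ t ≥ 86400 then 25 else t / 3600 + 1 := by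
  intro k
  induction k with
  | zero =>
    intro i hi hpre
    have : i = 24 := by omega
    subst this
    rw [get_time_bin_loopA]
    have h24 : ¬ (24 < 24) := by omega
    rw [dif_neg h24]
    have : t < 0 ∨ t ≥ 86400 := by
      rcases hpre with h | h
      · right; push_cast at h; omega
      · left; exact h
    rw [if_pos this]
  | succ k ih =>
    intro i hi hpre
    rw [get_time_bin_loopA]
    have h24 : i < 24 := by omega
    rw [dif_pos h24]
    by_cases hin : t ≥ 3600 * (i : Int) ∧ t < 3600 * ((i : Int) + 1)
    · rw [if_pos hin]
      have hlt : (i : Int) ≤ 23 := by exact_mod_cast Nat.le_of_lt_succ h24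
      have ht0 : ¬ (t < 0 ∨ t ≥ 86400) := by push_neg; constructor <;> omega
      rw [if_neg ht0]
      have : t / 3600 = (i : Int) := by omega
      omega
    · rw [if_neg hin]
      have e1 : (3600 : Int) * ((i : Int) + 1) = 3600 * ((i + 1 : Nat) : Int) := by
        push_cast; ring
      have e2 : (3600 : Int) * ((i + 1 : Nat) : Int) + 3600 = 3600 * (((i + 1 : Nat) : Int) + 1) := by
        push_cast; ring
      rw [e1, e2]
      apply ih (i + 1) (by omega)
      rcases hpre with h | h
      · left; push_cast at hin ⊢; omega
      · right; exact h

-- ===== VERDICT (by name: the statement is the Claim_ definition above) =====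
theorem get_time_bin_spec : Claim_equal_get_time_bin := by
  intro t _
  unfold Spec_get_time_bin get_time_bin get_time_bin_alt
  have h := get_time_bin_loopA_eq t 24 0 (by omega) (by omega)
  norm_num at h
  rw [h]
  by_cases hc : t < 0 ∨ t ≥ 86400
  · simp [hc]
  · rw [if_neg hc, if_neg hc]
    rw [PySem.Int.floordiv_eq_ediv_of_pos (by omega)]
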